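-- pv_equiv track=rewrite | github.com/nerdsane/deep-sci-fi | src/co_scientist/co_scientist.py | format_reflection_critiques
-- ===== SOURCE A (Python) =====
-- def format_reflection_critiques(critiques: list) -> str:
--     """Format reflection critiques for markdown output."""
--     content = "# Co-Scientist Reflection Critiques\n\n"
--     content += f"**Total Critiques Generated:** {len(critiques)}\n\n"
--
--     # Group by domain
--     by_domain = {}
--     for critique in critiques:
--         domain = critique.get("critique_domain", "Unknown")
--         if domain not in by_domain:
--             by_domain[domain] = []
--         by_domain[domain].append(critique)
--
--     for domain, domain_critiques in by_domain.items():
--         content += f"## {domain.title()} Expert Critiques ({len(domain_critiques)})\n\n"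
--
--         for critique in domain_critiques:
--             severity = critique.get("severity_score", "Unknown")
--             scenario_id = critique.get("target_scenario_id", "Unknown")
--             content += f"### Scenario {scenario_id[:8]}... (Severity: {severity}/10)\n"
--
--             critique_content = critique.get('critique_content', 'No content')
--             # Truncate for readability
--             if len(critique_content) > 500:
--                 content += critique_content[:500] + "...\n\n"
--             else:
--                 content += critique_content + "\n\n"
--             content += "---\n\n"
--
--     return content
-- ===== SOURCE B (Python) =====
-- def format_reflection_critiques(critiques: list) -> str:
--     """Format reflection critiques for markdown output."""
--     # Distinct domains in first-appearance order, then one re-scan per domain.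
--     domains = []
--     seen = set()
--     for c in critiques:
--         d = c.get("critique_domain", "Unknown")
--         if d not in seen:
--             seen.add(d)
--             domains.append(d)
--     content = "# Co-Scientist Reflection Critiques\n\n"
--     content += f"**Total Critiques Generated:** {len(critiques)}\n\n"
--     for d in domains:
--         group = [c for c in critiques if c.get("critique_domain", "Unknown") == d]
--         content += f"## {d.title()} Expert Critiques ({len(group)})\n\n"
--         for c in group:
--             content += _critique_block(c)
--     return content
--
--
-- def _critique_block(critique) -> str:
--     block = (f"### Scenario {critique.get('target_scenario_id', 'Unknown')[:8]}... "
--              f"(Severity: {critique.get('severity_score', 'Unknown')}/10)\n")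
--     body = critique.get('critique_content', 'No content')
--     if len(body) > 500:
--         block += body[:500] + "...\n\n"
--     else:
--         block += body + "\n\n"
--     return block + "---\n\n"
-- ===== Notes on version B (the rewrite author's own statement) =====
-- stated objective: alternative
-- what changed: B drops A's dict pre-grouping entirely: it collects the distinct domains in first-appearance order with a seen-set, then re-scans the critiques list once per domain with a filter, formatting each group as it goes.
import Mathlib
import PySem

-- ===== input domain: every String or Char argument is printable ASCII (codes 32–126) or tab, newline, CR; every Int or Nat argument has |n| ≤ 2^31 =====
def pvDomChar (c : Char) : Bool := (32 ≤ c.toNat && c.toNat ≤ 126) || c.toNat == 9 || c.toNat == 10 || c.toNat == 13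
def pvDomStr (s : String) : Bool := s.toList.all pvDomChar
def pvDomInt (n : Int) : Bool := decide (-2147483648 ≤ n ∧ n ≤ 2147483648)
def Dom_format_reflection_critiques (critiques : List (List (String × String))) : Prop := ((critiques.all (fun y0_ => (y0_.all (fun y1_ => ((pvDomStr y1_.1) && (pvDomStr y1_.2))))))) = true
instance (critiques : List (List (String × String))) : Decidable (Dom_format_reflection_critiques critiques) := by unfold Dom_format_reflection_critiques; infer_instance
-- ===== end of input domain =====

-- B re-decomposes A: instead of pre-grouping critiques into a dict, it collects the distinct
-- domains in first-appearance order and re-scans the critiques list once per domain (objective: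
-- alternative decomposition; same output, no speed claim).

-- shared helpers for Python builtins --
-- critique.get(k, dflt): dict lookup with default (first match, per the dict convention)
def dget (c : List (String × String)) (k dflt : String) : String :=
  (PySem.Dict.mk c).getD k dflt

-- hand port of str.title(); exact on the ASCII domain, where the cased characters are
-- exactly the letters: a letter after a letter is lowercased, otherwise uppercased
def pyTitleGo : Bool → List Char → List Char
  | _, [] => []
  | prevCased, c :: rest =>
    if PySem.Chars.isalpha c then
      (if prevCased then PySem.Chars.lowerChar c else PySem.Chars.upperChar c) :: pyTitleGo true rest
    else c :: pyTitleGo false rest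

def pyTitle (s : String) : String := String.ofList (pyTitleGo false s.toList)

-- ===== PORT A =====
def format_reflection_critiques (critiques : List (List (String × String))) : String :=
  let content := "# Co-Scientist Reflection Critiques\n\n"
  let content := content ++ ("**Total Critiques Generated:** " ++ PySem.Int.toStr (critiques.length : Int) ++ "\n\n")
  let by_domain : PySem.Dict String (List (List (String × String))) :=
    critiques.foldl (fun d c =>
      let domain := dget c "critique_domain" "Unknown"
      let d := if d.contains domain then d else d.insert domain []
      d.modify domain [] (fun l => l ++ [c])) PySem.Dict.empty
  by_domain.items.foldl (fun content p =>
    let content := content ++ ("## " ++ pyTitle p.1 ++ " Expert Critiques (" ++ PySem.Int.toStr (p.2.length : Int) ++ ")\n\n")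
    p.2.foldl (fun content c =>
      let severity := dget c "severity_score" "Unknown"
      let scenario_id := dget c "target_scenario_id" "Unknown"
      let content := content ++ ("### Scenario " ++ PySem.Str.slice scenario_id none (some 8) ++ "... (Severity: " ++ severity ++ "/10)\n")
      let critique_content := dget c "critique_content" "No content"
      let content :=
        if PySem.Str.len critique_content > 500 then
          content ++ (PySem.Str.slice critique_content none (some 500) ++ "...\n\n")
        else
          content ++ (critique_content ++ "\n\n")
      content ++ "---\n\n") content) content

-- ===== PORT B =====
-- port of Source B's _critique_block
def pyCritiqueBlock (critique : List (String × String)) : String :=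
  let block := "### Scenario " ++ PySem.Str.slice (dget critique "target_scenario_id" "Unknown") none (some 8) ++ "... (Severity: " ++ dget critique "severity_score" "Unknown" ++ "/10)\n"
  let body := dget critique "critique_content" "No content"
  let block :=
    if PySem.Str.len body > 500 then block ++ (PySem.Str.slice body none (some 500) ++ "...\n\n")
    else block ++ (body ++ "\n\n")
  block ++ "---\n\n"

def format_reflection_critiques_alt (critiques : List (List (String × String))) : String :=
  let st : PySem.Set String × List String :=
    critiques.foldl (fun st c =>
      let d := dget c "critique_domain" "Unknown"
      if PySem.Set.contains st.1 d then st
      else (PySem.Set.add st.1 d, st.2 ++ [d])) (PySem.Set.empty, [])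
  let domains := st.2
  let content := "# Co-Scientist Reflection Critiques\n\n"
  let content := content ++ ("**Total Critiques Generated:** " ++ PySem.Int.toStr (critiques.length : Int) ++ "\n\n")
  domains.foldl (fun content d =>
    let group := critiques.filter (fun c => dget c "critique_domain" "Unknown" == d)
    let content := content ++ ("## " ++ pyTitle d ++ " Expert Critiques (" ++ PySem.Int.toStr (group.length : Int) ++ ")\n\n")
    group.foldl (fun content c => content ++ pyCritiqueBlock c) content) content

-- ===== PRECONDITION & SPEC =====
def Spec_format_reflection_critiques (critiques : List (List (String × String))) (out : String) : Prop := out = format_reflection_critiques_alt critiques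
instance (critiques : List (List (String × String))) (out : String) : Decidable (Spec_format_reflection_critiques critiques out) := by unfold Spec_format_reflection_critiques; infer_instance

-- ===== CLAIM (what is proved, stated in full; the proofs are below) =====
def Claim_equal_format_reflection_critiques : Prop := ∀ (critiques : List (List (String × String))), Dom_format_reflection_critiques critiques → Spec_format_reflection_critiques critiques (format_reflection_critiques critiques)

-- ===== LEMMAS AND PROOFS =====

def domOf (c : List (String × String)) : String := dget c "critique_domain" "Unknown"

-- A's if-then-append dict step is exactly a `modify` with default []
theorem stepA_eq (d : PySem.Dict String (List (List (String × String)))) (c : List (String × String)) :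
    (let domain := dget c "critique_domain" "Unknown"
     let d := if d.contains domain then d else d.insert domain []
     d.modify domain [] (fun l => l ++ [c]))
    = d.modify (domOf c) [] (fun l => l ++ [c]) := by
  show (if d.contains (domOf c) then d else d.insert (domOf c) []).modify (domOf c) [] (fun l => l ++ [c])
      = d.modify (domOf c) [] (fun l => l ++ [c])
  by_cases h : d.contains (domOf c) = true
  · simp [h]
  · simp only [Bool.not_eq_true] at h
    simp [h, PySem.Dict.modify, PySem.Dict.getD_insert_self, PySem.Dict.insert_insert_self,
      PySem.Dict.getD_of_not_contains _ _ h]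

theorem foldl_funext {α β : Type} {f g : α → β → α} (h : ∀ a b, f a b = g a b)
    (l : List β) (init : α) : l.foldl f init = l.foldl g init := by
  induction l generalizing init with
  | nil => rfl
  | cons x xs ih => simp only [List.foldl_cons, h, ih]

-- the grouping dict of A, in canonical `modify` form
def groupDict (critiques : List (List (String × String))) : PySem.Dict String (List (List (String × String))) :=
  critiques.foldl (fun d c => d.modify (domOf c) [] (fun l => l ++ [c])) PySem.Dict.empty

theorem groupDict_keys (critiques : List (List (String × String))) :
    (groupDict critiques).keys = PySem.Set.ofList (critiques.map domOf) := by
  unfold groupDict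
  rw [PySem.Dict.keys_foldl_modify_key critiques domOf [] (fun _ c => fun l => l ++ [c])]
  simp [PySem.Set.update, PySem.Set.ofList_eq_foldl, PySem.Dict.keys_empty, List.foldl_map]

theorem groupDict_nodup (critiques : List (List (String × String))) :
    (groupDict critiques).keys.Nodup := by
  unfold groupDict
  exact PySem.Dict.nodup_keys_foldl_modify_key critiques domOf [] (fun _ c => fun l => l ++ [c])
    PySem.Dict.empty (by simp [PySem.Dict.keys_empty])

theorem groupDict_getD_aux (l : List (List (String × String))) (k : String) :
    ∀ d : PySem.Dict String (List (List (String × String))),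
      (l.foldl (fun d c => d.modify (domOf c) [] (fun l => l ++ [c])) d).getD k []
        = d.getD k [] ++ l.filter (fun c => domOf c == k) := by
  induction l with
  | nil => intro d; simp
  | cons c cs ih =>
    intro d
    rw [List.foldl_cons, ih, PySem.Dict.getD_modify, List.filter_cons]
    by_cases h : domOf c = k
    · simp [h]
    · have h2 : ¬ (k = domOf c) := fun e => h e.symm
      have h' : (domOf c == k) = false := by simp [h]
      simp [h2, h']

theorem groupDict_getD (critiques : List (List (String × String))) (k : String) :
    (groupDict critiques).getD k [] = critiques.filter (fun c => domOf c == k) := by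
  unfold groupDict
  rw [groupDict_getD_aux]
  simp

theorem groupDict_items (critiques : List (List (String × String))) :
    (groupDict critiques).items
      = (PySem.Set.ofList (critiques.map domOf)).map
          (fun k => (k, critiques.filter (fun c => domOf c == k))) := by
  rw [PySem.Dict.items_eq_map_keys _ (groupDict_nodup critiques) [], groupDict_keys]
  exact List.map_congr_left (fun k _ => by rw [groupDict_getD])

-- B's seen/domains loop computes the first-appearance dedup of the domains
theorem domains_eq (critiques : List (List (String × String))) :
    ∀ s : PySem.Set String,
      (critiques.foldl (fun st c =>
          if PySem.Set.contains st.1 (dget c "critique_domain" "Unknown") then st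
          else (PySem.Set.add st.1 (dget c "critique_domain" "Unknown"),
                st.2 ++ [dget c "critique_domain" "Unknown"])) (s, s))
      = ((critiques.map domOf).foldl PySem.Set.add s,
         (critiques.map domOf).foldl PySem.Set.add s) := by
  induction critiques with
  | nil => intro s; rfl
  | cons c cs ih =>
    intro s
    rw [List.foldl_cons, List.map_cons, List.foldl_cons]
    by_cases hb : PySem.Set.contains s (dget c "critique_domain" "Unknown") = true
    · have hm : dget c "critique_domain" "Unknown" ∈ s := by simpa [PySem.Set.contains] using hb
      have hstep : (if PySem.Set.contains (Prod.fst ((s, s) : PySem.Set String × List String))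
            (dget c "critique_domain" "Unknown") then ((s, s) : PySem.Set String × List String)
          else (PySem.Set.add (s, s).1 (dget c "critique_domain" "Unknown"),
                (s, s).2 ++ [dget c "critique_domain" "Unknown"])) = (s, s) := by
        simp [PySem.Set.contains, hm]
      have hadd : PySem.Set.add s (domOf c) = s := by
        unfold PySem.Set.add PySem.Set.contains domOf; simp [hm]
      rw [hstep, hadd]
      exact ih s
    · have hm : ¬ dget c "critique_domain" "Unknown" ∈ s := by
        simpa [PySem.Set.contains] using hb
      have hstep : (if PySem.Set.contains (Prod.fst ((s, s) : PySem.Set String × List String))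
            (dget c "critique_domain" "Unknown") then ((s, s) : PySem.Set String × List String)
          else (PySem.Set.add (s, s).1 (dget c "critique_domain" "Unknown"),
                (s, s).2 ++ [dget c "critique_domain" "Unknown"]))
          = (s ++ [dget c "critique_domain" "Unknown"], s ++ [dget c "critique_domain" "Unknown"]) := by
        simp [PySem.Set.contains, PySem.Set.add, hm]
      have hadd : PySem.Set.add s (domOf c) = s ++ [dget c "critique_domain" "Unknown"] := by
        unfold PySem.Set.add PySem.Set.contains domOf; simp [hm]
      rw [hstep, hadd]
      exact ih (s ++ [dget c "critique_domain" "Unknown"])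

theorem domains_final (critiques : List (List (String × String))) :
    (critiques.foldl (fun st c =>
        if PySem.Set.contains st.1 (dget c "critique_domain" "Unknown") then st
        else (PySem.Set.add st.1 (dget c "critique_domain" "Unknown"),
              st.2 ++ [dget c "critique_domain" "Unknown"])) (PySem.Set.empty, ([] : List String))).2
      = PySem.Set.ofList (critiques.map domOf) := by
  have h := domains_eq critiques PySem.Set.empty
  rw [show ((PySem.Set.empty, ([] : List String)) : PySem.Set String × List String)
      = (PySem.Set.empty, PySem.Set.empty) from rfl, h,
    PySem.Set.ofList_eq_foldl]
  rfl

-- ===== VERDICT (by name: the statement is the Claim_ definition above) =====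
theorem format_reflection_critiques_spec : Claim_equal_format_reflection_critiques := by
  intro critiques _
  unfold Spec_format_reflection_critiques
  unfold format_reflection_critiques format_reflection_critiques_alt
  simp only []
  rw [foldl_funext stepA_eq critiques PySem.Dict.empty]
  rw [show critiques.foldl (fun d c => PySem.Dict.modify d (domOf c) [] (fun l => l ++ [c])) PySem.Dict.empty
      = groupDict critiques from rfl]
  rw [groupDict_items, List.foldl_map, domains_final]
  have hpred : ∀ k : String,
      (fun c => dget c "critique_domain" "Unknown" == k) = (fun c => domOf c == k) :=
    fun _ => rfl
  apply foldl_funext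
  intro s k
  rw [hpred k]
  simp only []
  apply foldl_funext
  intro s' c
  simp only [pyCritiqueBlock]
  split_ifs with h <;> simp [String.append_assoc]
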